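-- pv_equiv track=rewrite | github.com/pypi-data/pypi-mirror-370 | packages/data4ai/data4ai-0.2.3.tar.gz/data4ai-0.2.3/data4ai/utils.py | compute_taxonomy_by_document
-- ===== SOURCE A (Python) =====
-- from typing import Any, Optional
--
-- def compute_taxonomy_coverage(data: list[dict[str, Any]]) -> dict[str, int]:
--     """Compute counts per taxonomy_level across examples.
--
--     Returns a dict with keys for the six Bloom levels and 'unspecified'.
--     """
--     levels = [
--         "remember",
--         "understand",
--         "apply",
--         "analyze",
--         "evaluate",
--         "create",
--     ]
--     counts = dict.fromkeys(levels, 0)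
--     counts["unspecified"] = 0
--
--     for item in data or []:
--         lvl = str(item.get("taxonomy_level", "unspecified")).strip().lower()
--         if lvl not in counts:
--             lvl = "unspecified"
--         counts[lvl] += 1
--     return counts
--
-- def compute_taxonomy_by_document(
--     data: list[dict[str, Any]],
-- ) -> dict[str, dict[str, int]]:
--     """Compute taxonomy coverage grouped by 'source_document' field.
--
--     If 'source_document' is missing, groups under 'unknown'.
--     """
--     groups: dict[str, list[dict[str, Any]]] = {}
--     for item in data or []:
--         key = str(item.get("source_document") or "unknown")
--         groups.setdefault(key, []).append(item)
--
--     return {k: compute_taxonomy_coverage(v) for k, v in groups.items()}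
-- ===== SOURCE B (Python) =====
-- def compute_taxonomy_by_document(data):
--     """Single streaming pass: count taxonomy levels per source document directly,
--     without building intermediate per-group lists."""
--     levels = [
--         "remember",
--         "understand",
--         "apply",
--         "analyze",
--         "evaluate",
--         "create",
--     ]
--     result = {}
--     for item in data or []:
--         key = str(item.get("source_document") or "unknown")
--         lvl = str(item.get("taxonomy_level", "unspecified")).strip().lower()
--         if lvl not in levels and lvl != "unspecified":
--             lvl = "unspecified"
--         if key not in result:
--             counts = dict.fromkeys(levels, 0)
--             counts["unspecified"] = 0
--             result[key] = counts
--         result[key][lvl] += 1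
--     return result
-- ===== Notes on version B (the rewrite author's own statement) =====
-- stated objective: alternative
-- what changed: B counts taxonomy levels per document in one streaming pass over the data, updating nested counters directly, instead of A's two phases of grouping items into per-document lists and then mapping the coverage counter over each list.
import Mathlib
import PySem

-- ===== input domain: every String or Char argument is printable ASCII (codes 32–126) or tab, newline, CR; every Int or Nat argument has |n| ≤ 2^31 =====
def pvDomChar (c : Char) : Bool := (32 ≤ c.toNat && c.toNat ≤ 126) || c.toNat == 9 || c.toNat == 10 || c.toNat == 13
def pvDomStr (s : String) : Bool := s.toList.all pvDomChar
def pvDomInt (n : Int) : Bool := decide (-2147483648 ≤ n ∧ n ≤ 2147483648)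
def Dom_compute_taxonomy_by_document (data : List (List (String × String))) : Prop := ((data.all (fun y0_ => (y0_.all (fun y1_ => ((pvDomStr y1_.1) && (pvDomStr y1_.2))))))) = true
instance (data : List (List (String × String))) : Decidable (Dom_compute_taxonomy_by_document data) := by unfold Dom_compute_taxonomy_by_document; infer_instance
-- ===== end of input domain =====

-- B replaces A's group-then-map (collect per-document item lists, then count each list with the
-- coverage helper) by one streaming pass that increments nested counters directly; no intermediate lists.

-- ===== PORT A =====
-- shared primitive: item.get(k) on the item dict (assoc list, first match)
def pvGet? (item : List (String × String)) (k : String) : Option String :=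
  (PySem.Dict.mk item).get? k

-- str(item.get("source_document") or "unknown")  (this exact expression occurs in both Pythons)
def pvKeyOf (item : List (String × String)) : String :=
  match pvGet? item "source_document" with
  | none => "unknown"
  | some s => if s = "" then "unknown" else s

-- str(item.get("taxonomy_level", "unspecified")).strip().lower()  (occurs in both Pythons)
def pvLvlRaw (item : List (String × String)) : String :=
  PySem.Str.lower (PySem.Str.strip ((pvGet? item "taxonomy_level").getD "unspecified"))

def pvBloomLevels : List String :=
  ["remember", "understand", "apply", "analyze", "evaluate", "create"]

-- counts = dict.fromkeys(levels, 0); counts["unspecified"] = 0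
def pvCounts0 : PySem.Dict String Int :=
  (pvBloomLevels.foldl (fun d k => d.insert k 0) PySem.Dict.empty).insert "unspecified" 0

-- loop body of A's compute_taxonomy_coverage: if lvl not in counts: lvl = "unspecified"; counts[lvl] += 1
def pvCoverageStep (c : PySem.Dict String Int) (item : List (String × String)) :
    PySem.Dict String Int :=
  let lvl := pvLvlRaw item
  let lvl := if c.contains lvl then lvl else "unspecified"
  c.modify lvl 0 (· + 1)

def pvCoverage (v : List (List (String × String))) : PySem.Dict String Int :=
  v.foldl pvCoverageStep pvCounts0

-- groups.setdefault(key, []).append(item)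
def pvStepA (g : PySem.Dict String (List (List (String × String))))
    (item : List (String × String)) : PySem.Dict String (List (List (String × String))) :=
  g.modify (pvKeyOf item) [] (· ++ [item])

def compute_taxonomy_by_document (data : List (List (String × String))) :
    List (String × List (String × Int)) :=
  let groups := data.foldl pvStepA PySem.Dict.empty
  groups.items.map (fun p => (p.1, (pvCoverage p.2).items))

-- ===== PORT B =====
-- if lvl not in levels and lvl != "unspecified": lvl = "unspecified"
def pvLvlB (item : List (String × String)) : String :=
  let lvl := pvLvlRaw item
  if lvl ∉ pvBloomLevels ∧ lvl ≠ "unspecified" then "unspecified" else lvl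

-- loop body of B: ensure result[key] is initialised, then result[key][lvl] += 1
def pvStepB (r : PySem.Dict String (PySem.Dict String Int))
    (item : List (String × String)) : PySem.Dict String (PySem.Dict String Int) :=
  let key := pvKeyOf item
  let lvl := pvLvlB item
  let r := if r.contains key then r else r.insert key pvCounts0
  r.modify key pvCounts0 (fun c => c.modify lvl 0 (· + 1))

def compute_taxonomy_by_document_alt (data : List (List (String × String))) :
    List (String × List (String × Int)) :=
  ((data.foldl pvStepB PySem.Dict.empty).items).map (fun p => (p.1, p.2.items))

-- ===== PRECONDITION & SPEC =====
def Spec_compute_taxonomy_by_document (data : List (List (String × String))) (out : List (String × List (String × Int))) : Prop := out = compute_taxonomy_by_document_alt data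
instance (data : List (List (String × String))) (out : List (String × List (String × Int))) : Decidable (Spec_compute_taxonomy_by_document data out) := by unfold Spec_compute_taxonomy_by_document; infer_instance

-- ===== CLAIM (what is proved, stated in full; the proofs are below) =====
def Claim_equal_compute_taxonomy_by_document : Prop := ∀ (data : List (List (String × String))), Dom_compute_taxonomy_by_document data → Spec_compute_taxonomy_by_document data (compute_taxonomy_by_document data)

-- ===== LEMMAS AND PROOFS =====

theorem pvCounts0_keys : pvCounts0.keys = pvBloomLevels ++ ["unspecified"] := rfl

theorem pvCoverageStep_norm (c : PySem.Dict String Int) (item : List (String × String))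
    (h : c.keys = pvBloomLevels ++ ["unspecified"]) :
    pvCoverageStep c item = c.modify (pvLvlB item) 0 (· + 1) := by
  unfold pvCoverageStep pvLvlB
  generalize pvLvlRaw item = l
  have hc : c.contains l = decide (l ∈ pvBloomLevels ++ ["unspecified"]) := by
    rw [PySem.Dict.contains_eq_decide_mem_keys, h]
  simp only [hc]
  by_cases hmem : l ∈ pvBloomLevels ++ ["unspecified"]
  · rw [if_pos (by simpa using hmem)]
    have hnot : ¬(l ∉ pvBloomLevels ∧ l ≠ "unspecified") := by
      simp only [List.mem_append, List.mem_singleton] at hmem; tauto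
    rw [if_neg hnot]
  · rw [if_neg (by simpa using hmem)]
    have hyes : l ∉ pvBloomLevels ∧ l ≠ "unspecified" := by
      simp only [List.mem_append, List.mem_singleton, not_or] at hmem; tauto
    rw [if_pos hyes]

theorem pvLvlB_mem (item : List (String × String)) :
    pvLvlB item ∈ pvBloomLevels ++ ["unspecified"] := by
  unfold pvLvlB
  generalize pvLvlRaw item = l
  by_cases hb : l ∉ pvBloomLevels ∧ l ≠ "unspecified"
  · rw [if_pos hb]; simp
  · rw [if_neg hb]
    simp only [List.mem_append, List.mem_singleton, not_and_or, not_not] at hb ⊢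
    tauto

theorem pvCoverageStep_keys (c : PySem.Dict String Int) (item : List (String × String))
    (h : c.keys = pvBloomLevels ++ ["unspecified"]) :
    (pvCoverageStep c item).keys = pvBloomLevels ++ ["unspecified"] := by
  rw [pvCoverageStep_norm c item h]
  have hcont : c.contains (pvLvlB item) = true := by
    rw [PySem.Dict.contains_eq_decide_mem_keys, h]
    simpa using pvLvlB_mem item
  simp only [PySem.Dict.modify]
  rw [PySem.Dict.keys_insert_of_contains _ _ hcont, h]

theorem pvCoverage_aux_keys (v : List (List (String × String))) :
    ∀ c : PySem.Dict String Int, c.keys = pvBloomLevels ++ ["unspecified"] →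
      (v.foldl pvCoverageStep c).keys = pvBloomLevels ++ ["unspecified"] := by
  induction v with
  | nil => intro c h; simpa using h
  | cons x xs ih =>
      intro c h
      simp only [List.foldl_cons]
      exact ih _ (pvCoverageStep_keys c x h)

theorem pvCoverage_append (v : List (List (String × String))) (item : List (String × String)) :
    pvCoverage (v ++ [item]) = (pvCoverage v).modify (pvLvlB item) 0 (· + 1) := by
  unfold pvCoverage
  rw [List.foldl_append]
  exact pvCoverageStep_norm _ item (pvCoverage_aux_keys v pvCounts0 pvCounts0_keys)

def pvMapCov (G : PySem.Dict String (List (List (String × String)))) :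
    PySem.Dict String (PySem.Dict String Int) :=
  PySem.Dict.mk (G.items.map (fun p => (p.1, pvCoverage p.2)))

theorem pvMapCov_get? (G : PySem.Dict String (List (List (String × String)))) (k : String) :
    (pvMapCov G).get? k = (G.get? k).map pvCoverage := by
  unfold pvMapCov PySem.Dict.get?
  rw [List.find?_map]
  have : ((fun p : String × PySem.Dict String Int => p.1 == k) ∘
      (fun p : String × List (List (String × String)) => (p.1, pvCoverage p.2)))
      = (fun p => p.1 == k) := rfl
  rw [this]
  cases hf : List.find? (fun p => p.1 == k) G.items <;> simp

theorem pvMapCov_contains (G : PySem.Dict String (List (List (String × String)))) (k : String) :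
    (pvMapCov G).contains k = G.contains k := by
  unfold pvMapCov PySem.Dict.contains
  rw [List.any_map]
  rfl

theorem pvStep_comm (G : PySem.Dict String (List (List (String × String))))
    (item : List (String × String)) :
    pvStepB (pvMapCov G) item = pvMapCov (pvStepA G item) := by
  unfold pvStepB pvStepA
  simp only [PySem.Dict.modify]
  generalize pvKeyOf item = k
  cases hc : G.contains k with
  | true =>
    have hcB : (pvMapCov G).contains k = true := by rw [pvMapCov_contains]; exact hc
    rw [if_pos hcB]
    obtain ⟨v, hv⟩ : ∃ v, G.get? k = some v := by
      have h1 := PySem.Dict.contains_eq_isSome_get? G k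
      rw [hc] at h1
      exact Option.isSome_iff_exists.mp h1.symm
    have hGd : G.getD k [] = v := by unfold PySem.Dict.getD; rw [hv]; rfl
    have hNd : (pvMapCov G).getD k pvCounts0 = pvCoverage v := by
      unfold PySem.Dict.getD; rw [pvMapCov_get?, hv]; rfl
    rw [hGd, hNd]
    have hcov : (pvCoverage v).modify (pvLvlB item) 0 (· + 1) = pvCoverage (v ++ [item]) :=
      (pvCoverage_append v item).symm
    simp only [PySem.Dict.modify] at hcov
    rw [hcov]
    apply PySem.Dict.ext
    rw [PySem.Dict.items_insert_of_contains _ _ hcB,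
        (show (pvMapCov (G.insert k (v ++ [item]))).items
          = (G.insert k (v ++ [item])).items.map (fun p => (p.1, pvCoverage p.2)) from rfl),
        PySem.Dict.items_insert_of_contains _ _ hc,
        (show (pvMapCov G).items = G.items.map (fun p => (p.1, pvCoverage p.2)) from rfl),
        List.map_map, List.map_map]
    apply List.map_congr_left
    intro p _
    by_cases hpk : (p.1 == k) = true <;> simp [Function.comp, hpk]
  | false =>
    have hcB : (pvMapCov G).contains k = false := by rw [pvMapCov_contains]; exact hc
    rw [if_neg (by simp [hcB])]
    have hNd : ((pvMapCov G).insert k pvCounts0).getD k pvCounts0 = pvCounts0 := by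
      unfold PySem.Dict.getD; rw [PySem.Dict.get?_insert_self]; rfl
    have hGd : G.getD k [] = [] := by
      have h1 := PySem.Dict.contains_eq_isSome_get? G k
      rw [hc] at h1
      unfold PySem.Dict.getD
      cases hg : G.get? k with
      | none => rfl
      | some w => rw [hg] at h1; simp at h1
    rw [hGd, hNd]
    apply PySem.Dict.ext
    rw [PySem.Dict.items_insert_of_contains _ _ (PySem.Dict.contains_insert_self _ _ _),
        PySem.Dict.items_insert_of_not_contains _ _ hcB,
        (show (pvMapCov (G.insert k ([] ++ [item]))).items
          = (G.insert k ([] ++ [item])).items.map (fun p => (p.1, pvCoverage p.2)) from rfl),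
        PySem.Dict.items_insert_of_not_contains _ _ hc,
        List.map_append, List.map_append]
    have hfresh : ∀ p ∈ (pvMapCov G).items, (p.1 == k) = false := by
      intro p hp
      by_contra hbad
      have h2 : (pvMapCov G).contains k = true :=
        List.any_eq_true.mpr ⟨p, hp, by simpa using hbad⟩
      rw [hcB] at h2; exact absurd h2 (by simp)
    have h1 : ((pvMapCov G).items.map
        (fun p => if (p.1 == k) = true then (k, pvCounts0.insert (pvLvlB item) (pvCounts0.getD (pvLvlB item) 0 + 1)) else p))
        = (pvMapCov G).items := by
      rw [show (pvMapCov G).items = (pvMapCov G).items.map id from (List.map_id _).symm,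
          List.map_map]
      apply List.map_congr_left
      intro p hp
      have hf : p.1 ≠ k := by simpa using hfresh p hp
      simp [hf]
    rw [h1]
    have hcov : pvCoverage ([] ++ [item])
        = pvCounts0.insert (pvLvlB item) (pvCounts0.getD (pvLvlB item) 0 + 1) := by
      have := pvCoverage_append [] item
      simp only [PySem.Dict.modify] at this
      rw [this]; rfl
    simp only [List.map_cons, List.map_nil]
    rw [if_pos (by simp : ((k, pvCounts0).1 == k) = true), ← hcov]
    rfl

theorem pvFold_comm (data : List (List (String × String))) :
    ∀ G, data.foldl pvStepB (pvMapCov G) = pvMapCov (data.foldl pvStepA G) := by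
  induction data with
  | nil => intro G; rfl
  | cons x xs ih =>
      intro G
      simp only [List.foldl_cons]
      rw [pvStep_comm]
      exact ih _

-- ===== VERDICT (by name: the statement is the Claim_ definition above) =====
theorem compute_taxonomy_by_document_spec : Claim_equal_compute_taxonomy_by_document := by
  intro data _
  unfold Spec_compute_taxonomy_by_document compute_taxonomy_by_document compute_taxonomy_by_document_alt
  rw [show (PySem.Dict.empty : PySem.Dict String (PySem.Dict String Int))
        = pvMapCov PySem.Dict.empty from rfl,
      pvFold_comm data PySem.Dict.empty]
  unfold pvMapCov
  rw [List.map_map]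
  rfl
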